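-- pv_equiv track=rewrite | github.com/N021/hlps_bot-2.0 | hotel-quiz-bot.py | map_hotel_style
-- ===== SOURCE A (Python) =====
-- def map_hotel_style(hotel_brand):
--     """
--     Зіставляє бренд готелю зі стилями
--
--     Args:
--         hotel_brand: бренд готелю (один рядок, не список)
--
--     Returns:
--         Словник стилів із відповідними значеннями True/False
--     """
--     # Переконуємося, що hotel_brand є рядком
--     if not isinstance(hotel_brand, str):
--         hotel_brand = str(hotel_brand)
--
--     hotel_brand = hotel_brand.lower()
--
--     # Оновлений повний словник стилів і брендів
--     style_mapping = {
--         "Розкішний і вишуканий": [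
--             "JW Marriott", "The Ritz-Carlton", "Conrad Hotels & Resorts",
--             "Waldorf Astoria Hotels & Resorts", "InterContinental Hotels & Resorts",
--             "Wyndham Grand", "Registry Collection Hotels", "Fairmont Hotels",
--             "Raffles Hotels & Resorts", "Park Hyatt Hotels", "Alila Hotels",
--             "Hyatt Regency", "Grand Hyatt", "Ascend Hotel Collection"
--         ],
--
--         "Бутік і унікальний": [
--             "Kimpton Hotels & Restaurants", "Registry Collection Hotels",
--             "Mercure Hotels", "ibis Styles", "Park Hyatt Hotels",
--             "Alila Hotels", "Ascend Hotel Collection"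
--         ],
--
--         "Класичний і традиційний": [
--             "The Ritz-Carlton", "Marriott Hotels", "Sheraton",
--             "Waldorf Astoria Hotels & Resorts", "Hilton Hotels & Resorts",
--             "InterContinental Hotels & Resorts", "Holiday Inn Hotels & Resorts",
--             "Wyndham", "Fairmont Hotels", "Raffles Hotels & Resorts",
--             "Ascend Hotel Collection"
--         ],
--
--         "Сучасний і дизайнерський": [
--             "Conrad Hotels & Resorts", "Kimpton Hotels & Restaurants",
--             "Crowne Plaza", "Wyndham Grand", "Novotel Hotels",
--             "Ibis Hotels", "ibis Styles", "Cambria Hotels",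
--             "Park Hyatt Hotels", "Grand Hyatt", "Hyatt Place"
--         ],
--
--         "Затишний і сімейний": [
--             "Fairfield Inn & Suites", "DoubleTree by Hilton",
--             "Hampton by Hilton", "Holiday Inn Hotels & Resorts",
--             "Candlewood Suites", "Wyndham", "Days Inn by Wyndham",
--             "Mercure Hotels", "Novotel Hotels", "Quality Inn Hotels",
--             "Comfort Inn Hotels", "Hyatt House"
--         ],
--
--         "Практичний і економічний": [
--             "Fairfield Inn & Suites", "Courtyard by Marriott",
--             "Hampton by Hilton", "Hilton Garden Inn",
--             "Holiday Inn Hotels & Resorts", "Holiday Inn Express",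
--             "Candlewood Suites", "Wingate by Wyndham",
--             "Super 8 by Wyndham", "Days Inn by Wyndham",
--             "Ibis Hotels", "ibis Styles", "Quality Inn Hotels",
--             "Comfort Inn Hotels", "Econo Lodge Hotels",
--             "Rodeway Inn Hotels", "Hyatt Place", "Hyatt House"
--         ]
--     }
--
--     # Додаємо англійські ключі для стилів
--     style_mapping_en = {
--         "Luxurious and refined": style_mapping["Розкішний і вишуканий"],
--         "Boutique and unique": style_mapping["Бутік і унікальний"],
--         "Classic and traditional": style_mapping["Класичний і традиційний"],
--         "Modern and designer": style_mapping["Сучасний і дизайнерський"],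
--         "Cozy and family-friendly": style_mapping["Затишний і сімейний"],
--         "Practical and economical": style_mapping["Практичний і економічний"]
--     }
--
--     # Об'єднуємо словники
--     combined_mapping = {**style_mapping, **style_mapping_en}
--
--     result = {}
--     for style, brands in combined_mapping.items():
--         # Більш гнучке порівняння назв брендів
--         is_match = False
--         for brand in brands:
--             brand_lower = brand.lower()
--             # Перевіряємо, чи містить бренд готелю назву бренду зі списку
--             if brand_lower in hotel_brand:
--                 is_match = True
--                 break
--         result[style] = is_match
--
--     return result
-- ===== SOURCE B (Python) =====
-- # B: one pass collects the set of matched brands across all styles, then each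
-- # style key just tests intersection with that set (instead of A's per-style scan).
--
-- _LUX = [
--     "JW Marriott", "The Ritz-Carlton", "Conrad Hotels & Resorts",
--     "Waldorf Astoria Hotels & Resorts", "InterContinental Hotels & Resorts",
--     "Wyndham Grand", "Registry Collection Hotels", "Fairmont Hotels",
--     "Raffles Hotels & Resorts", "Park Hyatt Hotels", "Alila Hotels",
--     "Hyatt Regency", "Grand Hyatt", "Ascend Hotel Collection"
-- ]
-- _BOUTIQUE = [
--     "Kimpton Hotels & Restaurants", "Registry Collection Hotels",
--     "Mercure Hotels", "ibis Styles", "Park Hyatt Hotels",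
--     "Alila Hotels", "Ascend Hotel Collection"
-- ]
-- _CLASSIC = [
--     "The Ritz-Carlton", "Marriott Hotels", "Sheraton",
--     "Waldorf Astoria Hotels & Resorts", "Hilton Hotels & Resorts",
--     "InterContinental Hotels & Resorts", "Holiday Inn Hotels & Resorts",
--     "Wyndham", "Fairmont Hotels", "Raffles Hotels & Resorts",
--     "Ascend Hotel Collection"
-- ]
-- _MODERN = [
--     "Conrad Hotels & Resorts", "Kimpton Hotels & Restaurants",
--     "Crowne Plaza", "Wyndham Grand", "Novotel Hotels",
--     "Ibis Hotels", "ibis Styles", "Cambria Hotels",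
--     "Park Hyatt Hotels", "Grand Hyatt", "Hyatt Place"
-- ]
-- _COZY = [
--     "Fairfield Inn & Suites", "DoubleTree by Hilton",
--     "Hampton by Hilton", "Holiday Inn Hotels & Resorts",
--     "Candlewood Suites", "Wyndham", "Days Inn by Wyndham",
--     "Mercure Hotels", "Novotel Hotels", "Quality Inn Hotels",
--     "Comfort Inn Hotels", "Hyatt House"
-- ]
-- _ECON = [
--     "Fairfield Inn & Suites", "Courtyard by Marriott",
--     "Hampton by Hilton", "Hilton Garden Inn",
--     "Holiday Inn Hotels & Resorts", "Holiday Inn Express",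
--     "Candlewood Suites", "Wingate by Wyndham",
--     "Super 8 by Wyndham", "Days Inn by Wyndham",
--     "Ibis Hotels", "ibis Styles", "Quality Inn Hotels",
--     "Comfort Inn Hotels", "Econo Lodge Hotels",
--     "Rodeway Inn Hotels", "Hyatt Place", "Hyatt House"
-- ]
--
-- _STYLES = [
--     ("Розкішний і вишуканий", _LUX),
--     ("Бутік і унікальний", _BOUTIQUE),
--     ("Класичний і традиційний", _CLASSIC),
--     ("Сучасний і дизайнерський", _MODERN),
--     ("Затишний і сімейний", _COZY),
--     ("Практичний і економічний", _ECON),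
--     ("Luxurious and refined", _LUX),
--     ("Boutique and unique", _BOUTIQUE),
--     ("Classic and traditional", _CLASSIC),
--     ("Modern and designer", _MODERN),
--     ("Cozy and family-friendly", _COZY),
--     ("Practical and economical", _ECON),
-- ]
--
--
-- def map_hotel_style(hotel_brand):
--     if not isinstance(hotel_brand, str):
--         hotel_brand = str(hotel_brand)
--     hb = hotel_brand.lower()
--     matched = {b for _, brands in _STYLES for b in brands if b.lower() in hb}
--     return {style: any(b in matched for b in brands) for style, brands in _STYLES}
-- ===== Notes on version B (the rewrite author's own statement) =====
-- stated objective: alternative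
-- what changed: Instead of A's per-style inner scan with break, B makes one sweep collecting the set of all brand strings whose lowercase is a substring of the input, then answers each of the 12 style keys by a membership test against that set.
import Mathlib
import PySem

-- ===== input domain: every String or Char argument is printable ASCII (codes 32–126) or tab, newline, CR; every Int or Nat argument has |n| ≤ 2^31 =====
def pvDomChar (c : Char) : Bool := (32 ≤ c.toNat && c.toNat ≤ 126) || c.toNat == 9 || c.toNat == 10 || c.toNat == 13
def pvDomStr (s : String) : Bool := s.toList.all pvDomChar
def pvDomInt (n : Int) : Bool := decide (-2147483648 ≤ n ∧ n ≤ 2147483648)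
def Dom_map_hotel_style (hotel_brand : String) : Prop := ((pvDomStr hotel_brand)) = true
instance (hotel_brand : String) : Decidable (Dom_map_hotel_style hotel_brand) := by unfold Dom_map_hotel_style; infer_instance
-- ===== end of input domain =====

-- B changes the matching pass: one sweep builds the set of matched brands, then each
-- style key only tests intersection with that set (alternative decomposition, same cost).

-- shared constant brand lists (A's style_mapping values; style_mapping_en reuses them, as in the Python)
def pvLux : List String := ["JW Marriott", "The Ritz-Carlton", "Conrad Hotels & Resorts",
  "Waldorf Astoria Hotels & Resorts", "InterContinental Hotels & Resorts",
  "Wyndham Grand", "Registry Collection Hotels", "Fairmont Hotels",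
  "Raffles Hotels & Resorts", "Park Hyatt Hotels", "Alila Hotels",
  "Hyatt Regency", "Grand Hyatt", "Ascend Hotel Collection"]
def pvBoutique : List String := ["Kimpton Hotels & Restaurants", "Registry Collection Hotels",
  "Mercure Hotels", "ibis Styles", "Park Hyatt Hotels", "Alila Hotels", "Ascend Hotel Collection"]
def pvClassic : List String := ["The Ritz-Carlton", "Marriott Hotels", "Sheraton",
  "Waldorf Astoria Hotels & Resorts", "Hilton Hotels & Resorts",
  "InterContinental Hotels & Resorts", "Holiday Inn Hotels & Resorts",
  "Wyndham", "Fairmont Hotels", "Raffles Hotels & Resorts", "Ascend Hotel Collection"]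
def pvModern : List String := ["Conrad Hotels & Resorts", "Kimpton Hotels & Restaurants",
  "Crowne Plaza", "Wyndham Grand", "Novotel Hotels", "Ibis Hotels", "ibis Styles",
  "Cambria Hotels", "Park Hyatt Hotels", "Grand Hyatt", "Hyatt Place"]
def pvCozy : List String := ["Fairfield Inn & Suites", "DoubleTree by Hilton",
  "Hampton by Hilton", "Holiday Inn Hotels & Resorts", "Candlewood Suites", "Wyndham",
  "Days Inn by Wyndham", "Mercure Hotels", "Novotel Hotels", "Quality Inn Hotels",
  "Comfort Inn Hotels", "Hyatt House"]
def pvEcon : List String := ["Fairfield Inn & Suites", "Courtyard by Marriott",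
  "Hampton by Hilton", "Hilton Garden Inn", "Holiday Inn Hotels & Resorts",
  "Holiday Inn Express", "Candlewood Suites", "Wingate by Wyndham", "Super 8 by Wyndham",
  "Days Inn by Wyndham", "Ibis Hotels", "ibis Styles", "Quality Inn Hotels",
  "Comfort Inn Hotels", "Econo Lodge Hotels", "Rodeway Inn Hotels", "Hyatt Place", "Hyatt House"]

-- ===== PORT A =====
-- A's inner 'for brand in brands: … break' loop
def pvALoop (hb : String) : List String → Bool
  | [] => false
  | brand :: rest =>
    if PySem.Str.isIn (PySem.Str.lower brand) hb then true else pvALoop hb rest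

def map_hotel_style (hotel_brand : String) : List (String × Bool) :=
  let hb := PySem.Str.lower hotel_brand
  let style_mapping : List (String × List String) :=
    [("Розкішний і вишуканий", pvLux), ("Бутік і унікальний", pvBoutique),
     ("Класичний і традиційний", pvClassic), ("Сучасний і дизайнерський", pvModern),
     ("Затишний і сімейний", pvCozy), ("Практичний і економічний", pvEcon)]
  let style_mapping_en : List (String × List String) :=
    [("Luxurious and refined", pvLux), ("Boutique and unique", pvBoutique),
     ("Classic and traditional", pvClassic), ("Modern and designer", pvModern),
     ("Cozy and family-friendly", pvCozy), ("Practical and economical", pvEcon)]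
  -- {**a, **b} with disjoint keys is the concatenation of the two item lists
  let combined := style_mapping ++ style_mapping_en
  (combined.foldl (fun res p => PySem.Dict.insert res p.1 (pvALoop hb p.2))
    (PySem.Dict.empty : PySem.Dict String Bool)).items

-- ===== PORT B =====
-- B's table _STYLES
def pvStyles : List (String × List String) :=
  [("Розкішний і вишуканий", pvLux), ("Бутік і унікальний", pvBoutique),
   ("Класичний і традиційний", pvClassic), ("Сучасний і дизайнерський", pvModern),
   ("Затишний і сімейний", pvCozy), ("Практичний і економічний", pvEcon),
   ("Luxurious and refined", pvLux), ("Boutique and unique", pvBoutique),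
   ("Classic and traditional", pvClassic), ("Modern and designer", pvModern),
   ("Cozy and family-friendly", pvCozy), ("Practical and economical", pvEcon)]

def map_hotel_style_alt (hotel_brand : String) : List (String × Bool) :=
  let hb := PySem.Str.lower hotel_brand
  let matched : PySem.Set String :=
    PySem.Set.ofList ((pvStyles.flatMap (fun p => p.2)).filter
      (fun b => PySem.Str.isIn (PySem.Str.lower b) hb))
  pvStyles.map (fun p => (p.1, p.2.any (fun b => PySem.Set.contains matched b)))

-- ===== PRECONDITION & SPEC =====
def Spec_map_hotel_style (hotel_brand : String) (out : List (String × Bool)) : Prop := out = map_hotel_style_alt hotel_brand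
instance (hotel_brand : String) (out : List (String × Bool)) : Decidable (Spec_map_hotel_style hotel_brand out) := by unfold Spec_map_hotel_style; infer_instance

-- ===== CLAIM (what is proved, stated in full; the proofs are below) =====
def Claim_equal_map_hotel_style : Prop := ∀ (hotel_brand : String), Dom_map_hotel_style hotel_brand → Spec_map_hotel_style hotel_brand (map_hotel_style hotel_brand)

-- ===== LEMMAS AND PROOFS =====

theorem pvALoop_eq_any (hb : String) (l : List String) :
    pvALoop hb l = l.any (fun b => PySem.Str.isIn (PySem.Str.lower b) hb) := by
  induction l with
  | nil => rfl
  | cons b rest ih =>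
    simp only [pvALoop, ih, List.any_cons]
    split_ifs with h
    · rw [h, Bool.true_or]
    · rw [Bool.not_eq_true] at h
      rw [h, Bool.false_or]

theorem pvMatched_contains (hb : String) (all : List String) (b : String) (hmem : b ∈ all) :
    PySem.Set.contains
      (PySem.Set.ofList (all.filter (fun x => PySem.Str.isIn (PySem.Str.lower x) hb))) b
      = PySem.Str.isIn (PySem.Str.lower b) hb := by
  cases hB : PySem.Str.isIn (PySem.Str.lower b) hb with
  | false =>
    cases hC : PySem.Set.contains
        (PySem.Set.ofList (all.filter (fun x => PySem.Str.isIn (PySem.Str.lower x) hb))) b with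
    | false => rfl
    | true =>
      exfalso
      have h1 := (PySem.Set.contains_iff _ _).mp hC
      rw [PySem.Set.mem_ofList] at h1
      have h2 := (List.mem_filter.mp h1).2
      rw [hB] at h2
      exact Bool.false_ne_true h2
  | true =>
    exact (PySem.Set.contains_iff _ _).mpr
      ((PySem.Set.mem_ofList _ _).mpr (List.mem_filter.mpr ⟨hmem, hB⟩))

theorem pvAny_matched (hb : String) (all brands : List String)
    (hsub : ∀ b ∈ brands, b ∈ all) :
    (brands.any (fun b => PySem.Set.contains
        (PySem.Set.ofList (all.filter (fun x => PySem.Str.isIn (PySem.Str.lower x) hb))) b))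
      = pvALoop hb brands := by
  rw [pvALoop_eq_any]
  induction brands with
  | nil => rfl
  | cons b rest ih =>
    simp only [List.any_cons]
    rw [pvMatched_contains hb all b (hsub b (by simp)),
        ih (fun x hx => hsub x (by simp [hx]))]

theorem pvBuild_items {α : Type} (g : α → Bool) (ps : List (String × α)) (d : PySem.Dict String Bool)
    (h : ∀ p ∈ ps, d.contains p.1 = false) (hnd : (ps.map Prod.fst).Nodup) :
    (ps.foldl (fun res p => res.insert p.1 (g p.2)) d).items
      = d.items ++ ps.map (fun p => (p.1, g p.2)) := by
  induction ps generalizing d with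
  | nil => simp
  | cons p rest ih =>
    simp only [List.foldl_cons, List.map_cons]
    rw [ih (d.insert p.1 (g p.2))]
    · rw [PySem.Dict.items_insert_of_not_contains d (g p.2) (h p (by simp))]
      simp
    · intro q hq
      rw [PySem.Dict.contains_insert]
      have hne : q.1 ≠ p.1 := by
        simp only [List.map_cons, List.nodup_cons] at hnd
        intro he
        exact hnd.1 (he ▸ List.mem_map_of_mem hq)
      simp [hne, h q (by simp [hq])]
    · simp only [List.map_cons, List.nodup_cons] at hnd
      exact hnd.2

-- ===== VERDICT (by name: the statement is the Claim_ definition above) =====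
theorem map_hotel_style_spec : Claim_equal_map_hotel_style := by
  intro hotel_brand _
  unfold Spec_map_hotel_style map_hotel_style map_hotel_style_alt
  rw [pvBuild_items (pvALoop (PySem.Str.lower hotel_brand))]
  · rw [show (PySem.Dict.empty : PySem.Dict String Bool).items = [] from rfl, List.nil_append]
    apply List.map_congr_left
    intro p hp
    have hsub : ∀ b ∈ p.2, b ∈ pvStyles.flatMap (fun q => q.2) := by
      intro b hb
      exact List.mem_flatMap.mpr ⟨p, hp, hb⟩
    rw [← pvAny_matched (PySem.Str.lower hotel_brand) _ _ hsub]
  · intro p _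
    exact PySem.Dict.contains_empty _
  · decide
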